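-- pv_equiv track=rewrite | github.com/davidbujok/static-site-generator | src/extractfunctions.py | extract_markdown_to_blocks
-- ===== SOURCE A (Python) =====
-- def extract_markdown_to_blocks(markdown):
--     lines = markdown.split("\n")
--     block = []
--     blocks = []
--     for line in lines:
--         if len(line) > 0:
--             block.append(line.strip())
--         else:
--             blocks.append(block)
--             block = []
--     if len(block) > 0:
--         blocks.append(block)
--     return blocks
-- ===== SOURCE B (Python) =====
-- def extract_markdown_to_blocks(markdown):
--     def split_blocks(lines):
--         if "" in lines:
--             i = lines.index("")
--             return [[l.strip() for l in lines[:i]]] + split_blocks(lines[i + 1:])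
--         if lines:
--             return [[l.strip() for l in lines]]
--         return []
--     return split_blocks(markdown.split("\n"))
-- ===== Notes on version B (the rewrite author's own statement) =====
-- stated objective: alternative
-- what changed: Replaces the single accumulator loop (current block + flush on blank line) by a recursive decomposition that repeatedly splits the line list at its first blank line with index/slicing and strips each segment by a comprehension.
import Mathlib
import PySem

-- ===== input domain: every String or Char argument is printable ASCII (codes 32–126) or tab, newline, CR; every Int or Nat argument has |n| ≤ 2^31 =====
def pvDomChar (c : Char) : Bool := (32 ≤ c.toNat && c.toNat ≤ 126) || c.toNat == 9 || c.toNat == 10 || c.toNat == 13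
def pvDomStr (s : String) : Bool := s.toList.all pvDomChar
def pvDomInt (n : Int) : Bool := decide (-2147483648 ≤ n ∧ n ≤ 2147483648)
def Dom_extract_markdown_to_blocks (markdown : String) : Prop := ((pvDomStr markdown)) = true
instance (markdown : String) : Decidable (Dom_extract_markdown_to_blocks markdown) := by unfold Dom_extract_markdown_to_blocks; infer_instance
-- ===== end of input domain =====

-- B recursively splits the line list at its first blank line instead of A's flush-on-blank accumulator loop; same result, same cost.

-- ===== PORT A =====
def extract_markdown_to_blocks (markdown : String) : List (List String) :=
  let lines := (PySem.Str.split? markdown "\n").getD []   -- sep "\n" ≠ "", so split? is some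
  let st := lines.foldl
    (fun (st : List String × List (List String)) line =>
      if PySem.Str.len line > 0 then (st.1 ++ [PySem.Str.strip line], st.2)
      else (([] : List String), st.2 ++ [st.1]))
    ([], [])
  if PySem.List.len st.1 > 0 then st.2 ++ [st.1] else st.2

-- ===== PORT B =====
def pvSplitBlocks (lines : List String) : List (List String) :=
  match h : PySem.List.index? lines "" with
  | some i =>
      (PySem.List.slice lines none (some (i : Int))).map PySem.Str.strip
        :: pvSplitBlocks (PySem.List.slice lines (some ((i : Int) + 1)) none)
  | none => if lines ≠ [] then [lines.map PySem.Str.strip] else []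
termination_by lines.length
decreasing_by
  obtain ⟨hk, -, -⟩ := PySem.List.getElem_of_index?_eq_some h
  rw [PySem.List.slice_from lines (a := (i : Int) + 1) (by omega)]
  simp only [List.length_drop]
  omega

def extract_markdown_to_blocks_alt (markdown : String) : List (List String) :=
  pvSplitBlocks ((PySem.Str.split? markdown "\n").getD [])

-- ===== PRECONDITION & SPEC =====
def Spec_extract_markdown_to_blocks (markdown : String) (out : List (List String)) : Prop := out = extract_markdown_to_blocks_alt markdown
instance (markdown : String) (out : List (List String)) : Decidable (Spec_extract_markdown_to_blocks markdown out) := by unfold Spec_extract_markdown_to_blocks; infer_instance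

-- ===== CLAIM (what is proved, stated in full; the proofs are below) =====
def Claim_equal_extract_markdown_to_blocks : Prop := ∀ (markdown : String), Dom_extract_markdown_to_blocks markdown → Spec_extract_markdown_to_blocks markdown (extract_markdown_to_blocks markdown)

-- ===== LEMMAS AND PROOFS =====

-- merge a pending block into the blocks still to be produced (A's loop invariant)
def pvMerge (acc : List String) : List (List String) → List (List String)
  | [] => if 0 < acc.length then [acc] else []
  | b :: r => (acc ++ b) :: r

-- cons a stripped line onto the first block (or open one)
def pvHead (s : String) : List (List String) → List (List String)
  | [] => [[s]]
  | b :: r => (s :: b) :: r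

lemma pvMerge_nil (sb : List (List String)) : pvMerge [] sb = sb := by
  cases sb <;> simp [pvMerge]

lemma sb_some (ls : List String) (i : Nat) (h : PySem.List.index? ls "" = some i) :
    pvSplitBlocks ls = ((ls.take i).map PySem.Str.strip) :: pvSplitBlocks (ls.drop (i + 1)) := by
  rw [pvSplitBlocks.eq_def]
  split
  · next j hj =>
    rw [h] at hj
    injection hj with hj; subst hj
    rw [PySem.List.slice_to_natCast]
    have : ((i : Int) + 1) = ((i + 1 : Nat) : Int) := by push_cast; ring
    rw [this, PySem.List.slice_from_natCast]
  · next hn => rw [h] at hn; cases hn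

lemma sb_none (ls : List String) (h : PySem.List.index? ls "" = none) :
    pvSplitBlocks ls = if ls ≠ [] then [ls.map PySem.Str.strip] else [] := by
  rw [pvSplitBlocks.eq_def]
  split
  · next j hj => rw [h] at hj; cases hj
  · rfl

lemma sb_nil : pvSplitBlocks [] = [] := by
  rw [sb_none [] (by simp [PySem.List.index?_eq_idxOf?])]
  simp

lemma sb_cons_blank (ls : List String) : pvSplitBlocks ("" :: ls) = [] :: pvSplitBlocks ls := by
  rw [sb_some ("" :: ls) 0 (PySem.List.index?_cons_self "" ls)]
  simp

lemma sb_cons_ne (l : String) (ls : List String) (hl : l ≠ "") :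
    pvSplitBlocks (l :: ls) = pvHead (PySem.Str.strip l) (pvSplitBlocks ls) := by
  have hidx := PySem.List.index?_cons_of_ne ls hl
  cases h : PySem.List.index? ls "" with
  | some i =>
    rw [h] at hidx
    rw [sb_some (l :: ls) (i + 1) (by simpa using hidx), sb_some ls i h]
    simp [pvHead, List.take_succ_cons, List.drop_succ_cons]
  | none =>
    rw [h] at hidx
    rw [sb_none (l :: ls) (by simpa using hidx), sb_none ls h]
    cases ls <;> simp [pvHead]

lemma pvMerge_head (acc : List String) (s : String) (sb : List (List String)) :
    pvMerge acc (pvHead s sb) = pvMerge (acc ++ [s]) sb := by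
  cases sb <;> simp [pvMerge, pvHead]

lemma str_eq_empty_of_toList_nil (s : String) (h : s.toList = []) : s = "" := by
  have := congrArg String.ofList h
  simpa using this

lemma fold_eq (ls : List String) : ∀ (acc : List String) (bs : List (List String)),
    (let st := ls.foldl
      (fun (st : List String × List (List String)) line =>
        if PySem.Str.len line > 0 then (st.1 ++ [PySem.Str.strip line], st.2)
        else (([] : List String), st.2 ++ [st.1]))
      (acc, bs)
     if PySem.List.len st.1 > 0 then st.2 ++ [st.1] else st.2)
    = bs ++ pvMerge acc (pvSplitBlocks ls) := by
  induction ls with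
  | nil =>
    intro acc bs
    simp only [List.foldl_nil, sb_nil, pvMerge, PySem.List.len_eq]
    split_ifs with h1 h2 <;> simp_all
  | cons l ls ih =>
    intro acc bs
    simp only [List.foldl_cons]
    by_cases hl : PySem.Str.len l > 0
    · rw [if_pos hl]
      have hne : l ≠ "" := by
        intro he; subst he
        simp [PySem.Str.len_eq] at hl
      rw [ih (acc ++ [PySem.Str.strip l]) bs, sb_cons_ne l ls hne, pvMerge_head]
    · rw [if_neg hl]
      have hnil : l = "" := by
        apply str_eq_empty_of_toList_nil
        rw [PySem.Str.len_eq] at hl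
        have : l.toList.length = 0 := by omega
        simpa using this
      subst hnil
      rw [ih [] (bs ++ [acc]), sb_cons_blank, pvMerge_nil]
      cases h : pvSplitBlocks ls <;> simp [pvMerge]

-- ===== VERDICT (by name: the statement is the Claim_ definition above) =====
theorem extract_markdown_to_blocks_spec : Claim_equal_extract_markdown_to_blocks := by
  intro markdown _
  unfold Spec_extract_markdown_to_blocks extract_markdown_to_blocks extract_markdown_to_blocks_alt
  rw [fold_eq ((PySem.Str.split? markdown "\n").getD []) [] [], pvMerge_nil]
  simp
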